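-- pv_equiv track=rewrite | github.com/felipedias1/restaurant-orders | src/analyze_log.py | joao_days
-- ===== SOURCE A (Python) =====
-- def joao_days(data):
--     menu = set(item["dia"] for item in data)
--     customer_days = []
--     for order in data:
--         if order["nome"] == "joao":
--             customer_days.append(order["dia"])
--     new_dict = set(customer_days)
--     return menu - new_dict
-- ===== SOURCE B (Python) =====
-- def joao_days(data):
--     # Build a dict mapping each day to whether joao ever ordered on it,
--     # then collect the days whose flag stayed False (no set difference).
--     flags = {}
--     for order in data:
--         day = order["dia"]
--         flags[day] = flags.get(day, False) or order["nome"] == "joao"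
--     return {day for day, has_joao in flags.items() if not has_joao}
-- ===== Notes on version B (the rewrite author's own statement) =====
-- stated objective: alternative
-- what changed: B replaces A's two set-builds plus set difference with a single pass building a dict mapping each day to a boolean 'joao ordered that day' flag, then returns the days whose flag is False; no set subtraction is performed.
import Mathlib
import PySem

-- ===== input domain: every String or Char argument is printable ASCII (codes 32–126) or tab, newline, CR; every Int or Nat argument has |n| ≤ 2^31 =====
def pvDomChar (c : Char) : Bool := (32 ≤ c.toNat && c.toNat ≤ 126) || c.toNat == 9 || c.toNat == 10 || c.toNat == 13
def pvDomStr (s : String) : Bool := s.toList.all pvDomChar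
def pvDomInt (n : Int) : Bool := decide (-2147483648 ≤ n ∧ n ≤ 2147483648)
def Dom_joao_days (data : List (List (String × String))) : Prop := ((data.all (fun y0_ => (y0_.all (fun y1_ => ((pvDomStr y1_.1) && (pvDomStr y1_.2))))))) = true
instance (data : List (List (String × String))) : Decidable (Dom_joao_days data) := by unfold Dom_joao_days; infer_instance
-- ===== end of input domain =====

-- B replaces A's two sets + set difference with one pass building a day→"joao ordered" flag dict, returning the days whose flag is False.


-- shared shorthand for the KeyError-raising lookups order["dia"] / order["nome"] (total getD form, exact under Pre_joao_days)
def pvDia (o : List (String × String)) : String := (PySem.Dict.mk o).getD "dia" ""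
def pvNome (o : List (String × String)) : String := (PySem.Dict.mk o).getD "nome" ""

-- ===== PORT A =====
-- menu = set(item["dia"] for item in data); loop appending joao's days; set(customer_days); set difference.
def joao_days (data : List (List (String × String))) : List String :=
  let menu := PySem.Set.ofList (data.map (fun item => pvDia item))
  let customer_days := data.foldl
    (fun acc order => if pvNome order = "joao" then acc ++ [pvDia order] else acc) []
  let new_dict := PySem.Set.ofList customer_days
  PySem.Set.diff menu new_dict

-- ===== PORT B =====
-- one pass: flags[day] = flags.get(day, False) or order["nome"] == "joao"; result = days whose flag is False
def joao_days_alt (data : List (List (String × String))) : List String :=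
  let flags := data.foldl
    (fun (fl : PySem.Dict String Bool) order =>
      fl.insert (pvDia order) (fl.getD (pvDia order) false || (pvNome order == "joao")))
    PySem.Dict.empty
  PySem.Set.ofList ((flags.items.filter (fun p => !p.2)).map (fun p => p.1))

-- ===== PRECONDITION & SPEC =====
-- Pre_ excludes exactly the inputs where a missing "dia"/"nome" key makes A (and B) raise KeyError.
def Pre_joao_days (data : List (List (String × String))) : Prop :=
  ∀ item ∈ data, (PySem.Dict.mk item).contains "dia" ∧ (PySem.Dict.mk item).contains "nome"
instance (data : List (List (String × String))) : Decidable (Pre_joao_days data) := by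
  unfold Pre_joao_days; infer_instance
def pvWitness_joao_days : (List (List (String × String))) :=
  [[("dia", "seg"), ("nome", "joao")], [("dia", "ter"), ("nome", "ana")]]
def Spec_joao_days (data : List (List (String × String))) (out : List String) : Prop := out = joao_days_alt data
instance (data : List (List (String × String))) (out : List String) : Decidable (Spec_joao_days data out) := by unfold Spec_joao_days; infer_instance

-- ===== CLAIM (what is proved, stated in full; the proofs are below) =====
def Claim_equal_joao_days : Prop := ∀ (data : List (List (String × String))), Dom_joao_days data → Pre_joao_days data → Spec_joao_days data (joao_days data)

-- ===== LEMMAS AND PROOFS =====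

-- the final flag of a key is its start value OR'ed with "some order with that dia has nome joao"
theorem flag_fold_getD (l : List (List (String × String))) (d : PySem.Dict String Bool) (k : String) :
    (l.foldl (fun (fl : PySem.Dict String Bool) order =>
        fl.insert (pvDia order) (fl.getD (pvDia order) false || (pvNome order == "joao"))) d).getD k false
    = (d.getD k false || l.any (fun o => pvDia o == k && (pvNome o == "joao"))) := by
  induction l generalizing d with
  | nil => simp
  | cons x xs ih =>
    simp only [List.foldl_cons, List.any_cons, ih, PySem.Dict.getD_insert]
    split_ifs with h
    · simp [h, Bool.or_assoc]
    · have : (pvDia x == k) = false := by simp [Ne.symm h]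
      simp [this]

-- set() of a duplicate-free list is that list
theorem ofList_of_nodup {α : Type} [BEq α] [LawfulBEq α] (xs : List α) (h : xs.Nodup) :
    PySem.Set.ofList xs = xs := by
  suffices H : ∀ (s xs : List α), (s ++ xs).Nodup →
      xs.foldl (PySem.Set.add (α := α)) s = s ++ xs by
    simpa using H [] xs (by simpa using h)
  intro s xs
  induction xs generalizing s with
  | nil => simp
  | cons x xs ih =>
    intro hnd
    have hx : x ∉ s := by
      intro hmem
      exact (List.disjoint_of_nodup_append hnd) hmem (by simp)
    simp only [List.foldl_cons, PySem.Set.add_of_not_mem hx]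
    rw [ih (s ++ [x]) (by simpa using hnd)]
    simp

-- A's customer_days loop is the filtered map (via PySem.List.foldl_append_if)
theorem customer_fold (data : List (List (String × String))) :
    data.foldl (fun acc order => if pvNome order = "joao" then acc ++ [pvDia order] else acc) []
    = (data.filter (fun o => pvNome o == "joao")).map pvDia := by
  simpa using PySem.List.foldl_append_if (fun o => pvNome o == "joao") pvDia data []

-- membership test in A's joao set equals B's any-flag
theorem joao_contains (data : List (List (String × String))) (k : String) :
    ((PySem.Set.ofList ((data.filter (fun o => pvNome o == "joao")).map pvDia)).contains k)
    = data.any (fun o => pvDia o == k && (pvNome o == "joao")) := by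
  rw [Bool.eq_iff_iff]
  simp only [PySem.Set.contains_iff, PySem.Set.mem_ofList, List.mem_map, List.mem_filter,
    List.any_eq_true, Bool.and_eq_true, beq_iff_eq]
  constructor
  · rintro ⟨o, ⟨ho, hn⟩, hk⟩; exact ⟨o, ho, hk, hn⟩
  · rintro ⟨o, ho, hk, hn⟩; exact ⟨o, ⟨ho, hn⟩, hk⟩

-- ===== VERDICT (by name: the statement is the Claim_ definition above) =====
-- proof-only helper: B's flag dict, named so the rewrites can target it
def pvFlags (data : List (List (String × String))) : PySem.Dict String Bool :=
  data.foldl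
    (fun (fl : PySem.Dict String Bool) order =>
      fl.insert (pvDia order) (fl.getD (pvDia order) false || (pvNome order == "joao")))
    PySem.Dict.empty

-- ===== VERDICT (by name: the statement is the Claim_ definition above) =====
theorem joao_days_spec : Claim_equal_joao_days := by
  intro data _ _
  unfold Spec_joao_days joao_days joao_days_alt
  simp only []
  rw [customer_fold]
  have hnd : (pvFlags data).keys.Nodup :=
    PySem.Dict.nodup_keys_foldl_insert_key data pvDia _ PySem.Dict.empty (by simp)
  rw [show (List.foldl
      (fun (fl : PySem.Dict String Bool) order =>
        fl.insert (pvDia order) (fl.getD (pvDia order) false || (pvNome order == "joao")))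
      PySem.Dict.empty data) = pvFlags data from rfl]
  rw [PySem.Dict.items_eq_map_keys _ hnd false]
  rw [show (pvFlags data).keys
      = PySem.Set.update (PySem.Dict.empty (κ := String) (ν := Bool)).keys (data.map pvDia)
    from PySem.Dict.keys_foldl_insert_key data pvDia _ PySem.Dict.empty]
  rw [List.filter_map, List.map_map]
  change (PySem.Set.ofList (data.map pvDia)).diff
      (PySem.Set.ofList ((data.filter (fun o => pvNome o == "joao")).map pvDia)) =
    PySem.Set.ofList
      (((PySem.Set.ofList (data.map pvDia)).filter
          (fun k => !(pvFlags data).getD k false)).map (fun k => k))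
  rw [List.map_id']
  rw [ofList_of_nodup _ (List.Nodup.filter _ (PySem.Set.nodup_ofList _))]
  refine List.filter_congr (fun k _ => ?_)
  simp only [pvFlags, flag_fold_getD, PySem.Dict.getD_empty, Bool.false_or]
  rw [joao_contains]
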